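-- pv_equiv track=rewrite | github.com/kojunwoan/programmers | 프로그래머스/lv2/12985. 예상 대진표/예상 대진표.py | solution
-- ===== SOURCE A (Python) =====
-- def solution(n, a, b):
--     a, b = a - 1 , b - 1
--     c = 0
--     while a != b:
--         a >>= 1
--         b >>= 1
--         c += 1
--     return c
-- ===== SOURCE B (Python) =====
-- def solution(n, a, b):
--     # Round where players a and b first meet: highest differing bit of the
--     # zero-based seeds, i.e. the bit length of their XOR.
--     return ((a - 1) ^ (b - 1)).bit_length()
-- ===== Notes on version B (the rewrite author's own statement) =====
-- stated objective: idiomatic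
-- what changed: The halve-until-equal loop is replaced by the closed form ((a-1) ^ (b-1)).bit_length(): the position of the highest differing bit of the zero-based seeds is exactly the round where the players meet.
-- outside the precondition, e.g. on solution(8, 1, 0): A does not finish within the time limit, B returns 1
import Mathlib
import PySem

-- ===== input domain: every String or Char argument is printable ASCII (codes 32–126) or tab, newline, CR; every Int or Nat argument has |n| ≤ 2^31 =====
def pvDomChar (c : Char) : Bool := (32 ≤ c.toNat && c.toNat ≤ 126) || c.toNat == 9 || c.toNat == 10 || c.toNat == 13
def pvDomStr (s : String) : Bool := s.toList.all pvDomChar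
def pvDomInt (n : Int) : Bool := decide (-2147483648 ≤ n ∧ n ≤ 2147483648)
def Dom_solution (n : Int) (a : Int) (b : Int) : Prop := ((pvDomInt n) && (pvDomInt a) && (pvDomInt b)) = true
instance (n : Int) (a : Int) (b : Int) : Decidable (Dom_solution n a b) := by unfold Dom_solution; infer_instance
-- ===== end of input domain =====

-- B replaces A's halve-until-equal loop by the closed form bit_length((a-1) XOR (b-1)) (idiomatic, loop-free).


-- ===== PORT A =====
-- the while loop; fuel only makes it total (64 ≥ the iterations needed on any input in Dom ∩ Pre)
def solLoop : Nat → Int → Int → Int → Int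
  | 0, _, _, c => c
  | fuel + 1, a, b, c =>
      if a = b then c else solLoop fuel (a >>> 1) (b >>> 1) (c + 1)

def solution (n : Int) (a : Int) (b : Int) : Int := solLoop 64 (a - 1) (b - 1) 0

-- ===== PORT B =====
def solution_alt (n : Int) (a : Int) (b : Int) : Int :=
  ((PySem.Int.bitLength (PySem.Int.bxor (a - 1) (b - 1)) : Nat) : Int)

-- ===== PRECONDITION & SPEC =====
-- Pre_ excludes the mixed-sign inputs (exactly one of a, b ≥ 1), on which A's while loop never
-- terminates (one value sinks to -1, the other to 0); A returns on every input Pre_ admits.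
def Pre_solution (n : Int) (a : Int) (b : Int) : Prop := (1 ≤ a ↔ 1 ≤ b)
instance (n : Int) (a : Int) (b : Int) : Decidable (Pre_solution n a b) := by unfold Pre_solution; infer_instance
def pvWitness_solution : Int × Int × Int := (8, 4, 7)
def Spec_solution (n : Int) (a : Int) (b : Int) (out : Int) : Prop := out = solution_alt n a b
instance (n : Int) (a : Int) (b : Int) (out : Int) : Decidable (Spec_solution n a b out) := by unfold Spec_solution; infer_instance

-- ===== CLAIM (what is proved, stated in full; the proofs are below) =====
def Claim_equal_solution : Prop := ∀ (n : Int) (a : Int) (b : Int), Dom_solution n a b → Pre_solution n a b → Spec_solution n a b (solution n a b)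

-- ===== LEMMAS AND PROOFS =====

-- loop characterisation, nonnegative representatives
lemma solLoop_ofNat : ∀ (fuel m k : Nat) (c : Int), m < 2 ^ fuel → k < 2 ^ fuel →
    solLoop fuel (Int.ofNat m) (Int.ofNat k) c
      = c + ((PySem.Int.bitLength ((m ^^^ k : Nat) : Int) : Nat) : Int) := by
  intro fuel
  induction fuel with
  | zero => intro m k c hm hk; interval_cases m <;> interval_cases k <;> simp [solLoop]
  | succ f ih =>
      intro m k c hm hk
      by_cases h : m = k
      · subst h; simp [solLoop]
      · have hx : (m ^^^ k) ≠ 0 := by simpa [Nat.xor_eq_zero_iff] using h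
        have hbl : PySem.Int.bitLength ((m ^^^ k : Nat) : Int)
            = PySem.Int.bitLength (((m ^^^ k) / 2 : Nat) : Int) + 1 :=
          PySem.Int.bitLength_natCast (by omega)
        have hdist : (m / 2) ^^^ (k / 2) = (m ^^^ k) / 2 := by
          simpa [Nat.shiftRight_one] using (Nat.shiftRight_xor_distrib (a:=m) (b:=k) (i:=1)).symm
        have hp : (2 : Nat) ^ (f + 1) = 2 * 2 ^ f := by ring
        have hm2 : m / 2 < 2 ^ f := by omega
        have hk2 : k / 2 < 2 ^ f := by omega
        have hshift : (Int.ofNat m) >>> 1 = Int.ofNat (m / 2) := by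
          show Int.ofNat (m >>> 1) = Int.ofNat (m / 2)
          simp [Nat.shiftRight_one]
        have hshift' : (Int.ofNat k) >>> 1 = Int.ofNat (k / 2) := by
          show Int.ofNat (k >>> 1) = Int.ofNat (k / 2)
          simp [Nat.shiftRight_one]
        have hne : (Int.ofNat m : Int) ≠ Int.ofNat k := by
          simpa [Int.ofNat_eq_natCast, Nat.cast_injective.eq_iff] using h
        calc solLoop (f + 1) (Int.ofNat m) (Int.ofNat k) c
            = solLoop f (Int.ofNat (m / 2)) (Int.ofNat (k / 2)) (c + 1) := by
              simp only [solLoop]; rw [if_neg hne, hshift, hshift']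
          _ = (c + 1) + ((PySem.Int.bitLength (((m / 2) ^^^ (k / 2) : Nat) : Int) : Nat) : Int) :=
              ih (m / 2) (k / 2) (c + 1) hm2 hk2
          _ = c + ((PySem.Int.bitLength ((m ^^^ k : Nat) : Int) : Nat) : Int) := by
              rw [hdist, hbl]; push_cast; ring

-- loop characterisation, negative representatives
lemma solLoop_negSucc : ∀ (fuel m k : Nat) (c : Int), m < 2 ^ fuel → k < 2 ^ fuel →
    solLoop fuel (Int.negSucc m) (Int.negSucc k) c
      = c + ((PySem.Int.bitLength ((m ^^^ k : Nat) : Int) : Nat) : Int) := by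
  intro fuel
  induction fuel with
  | zero => intro m k c hm hk; interval_cases m <;> interval_cases k <;> simp [solLoop]
  | succ f ih =>
      intro m k c hm hk
      by_cases h : m = k
      · subst h; simp [solLoop]
      · have hbl : PySem.Int.bitLength ((m ^^^ k : Nat) : Int)
            = PySem.Int.bitLength (((m ^^^ k) / 2 : Nat) : Int) + 1 :=
          PySem.Int.bitLength_natCast (by
            have : (m ^^^ k) ≠ 0 := by simpa [Nat.xor_eq_zero_iff] using h
            omega)
        have hdist : (m / 2) ^^^ (k / 2) = (m ^^^ k) / 2 := by
          simpa [Nat.shiftRight_one] using (Nat.shiftRight_xor_distrib (a:=m) (b:=k) (i:=1)).symm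
        have hp : (2 : Nat) ^ (f + 1) = 2 * 2 ^ f := by ring
        have hm2 : m / 2 < 2 ^ f := by omega
        have hk2 : k / 2 < 2 ^ f := by omega
        have hshift : (Int.negSucc m) >>> 1 = Int.negSucc (m / 2) := by
          show Int.negSucc (m >>> 1) = Int.negSucc (m / 2)
          simp [Nat.shiftRight_one]
        have hshift' : (Int.negSucc k) >>> 1 = Int.negSucc (k / 2) := by
          show Int.negSucc (k >>> 1) = Int.negSucc (k / 2)
          simp [Nat.shiftRight_one]
        have hne : Int.negSucc m ≠ Int.negSucc k := by simp [h]
        calc solLoop (f + 1) (Int.negSucc m) (Int.negSucc k) c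
            = solLoop f (Int.negSucc (m / 2)) (Int.negSucc (k / 2)) (c + 1) := by
              simp only [solLoop]; rw [if_neg hne, hshift, hshift']
          _ = (c + 1) + ((PySem.Int.bitLength (((m / 2) ^^^ (k / 2) : Nat) : Int) : Nat) : Int) :=
              ih (m / 2) (k / 2) (c + 1) hm2 hk2
          _ = c + ((PySem.Int.bitLength ((m ^^^ k : Nat) : Int) : Nat) : Int) := by
              rw [hdist, hbl]; push_cast; ring

lemma bxor_negSucc (m k : Nat) :
    PySem.Int.bxor (Int.negSucc m) (Int.negSucc k) = Int.ofNat (m ^^^ k) := by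
  simp [PySem.Int.bxor]

-- ===== VERDICT (by name: the statement is the Claim_ definition above) =====
theorem solution_spec : Claim_equal_solution := by
  intro n a b hd hpre
  have hd' : -2147483648 ≤ a ∧ a ≤ 2147483648 ∧ -2147483648 ≤ b ∧ b ≤ 2147483648 := by
    simp [Dom_solution, pvDomInt] at hd; tauto
  have hp64 : (2 : Nat) ^ 64 = 18446744073709551616 := by norm_num
  unfold Spec_solution solution solution_alt
  by_cases ha : 1 ≤ a
  · have hb : 1 ≤ b := hpre.mp ha
    obtain ⟨m, hm⟩ : ∃ m : Nat, a - 1 = Int.ofNat m :=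
      ⟨(a - 1).toNat, by simp [Int.ofNat_eq_natCast]; omega⟩
    obtain ⟨k, hk⟩ : ∃ k : Nat, b - 1 = Int.ofNat k :=
      ⟨(b - 1).toNat, by simp [Int.ofNat_eq_natCast]; omega⟩
    have hmb : m < 2 ^ 64 := by
      rw [hp64]
      have : (m : Int) = a - 1 := by rw [hm]; simp [Int.ofNat_eq_natCast]
      omega
    have hkb : k < 2 ^ 64 := by
      rw [hp64]
      have : (k : Int) = b - 1 := by rw [hk]; simp [Int.ofNat_eq_natCast]
      omega
    rw [hm, hk, solLoop_ofNat 64 m k 0 hmb hkb]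
    simp [Int.ofNat_eq_natCast]
  · have hb : ¬ 1 ≤ b := fun h => ha (hpre.mpr h)
    obtain ⟨m, hm⟩ : ∃ m : Nat, a - 1 = Int.negSucc m :=
      ⟨(-a).toNat, by rw [Int.negSucc_eq]; omega⟩
    obtain ⟨k, hk⟩ : ∃ k : Nat, b - 1 = Int.negSucc k :=
      ⟨(-b).toNat, by rw [Int.negSucc_eq]; omega⟩
    have hmb : m < 2 ^ 64 := by
      rw [hp64]
      have : a - 1 = -(m : Int) - 1 := by rw [hm, Int.negSucc_eq]; ring
      omega
    have hkb : k < 2 ^ 64 := by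
      rw [hp64]
      have : b - 1 = -(k : Int) - 1 := by rw [hk, Int.negSucc_eq]; ring
      omega
    rw [hm, hk, solLoop_negSucc 64 m k 0 hmb hkb, bxor_negSucc]
    simp [Int.ofNat_eq_natCast]
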